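-- pv_equiv track=rewrite | github.com/renanvieira/advent_of_code_python | day-3/part2.py | build_claimed_and_overlapping
-- ===== SOURCE A (Python) =====
-- def build_claimed_and_overlapping(claims):
--     claimed = set()
--     overlapping = set()
--
--     for claim in claims:
--         current = set(
--             (i + claim["x"], claim["y"] + j) for i in range(claim["width"]) for j in range(claim["height"]))
--
--         overlapping |= current & claimed
--         claimed |= current
--
--     return claimed, overlapping
-- ===== SOURCE B (Python) =====
-- def build_claimed_and_overlapping(claims):
--     claimed = set()
--     overlapping = set()
--     earlier = []
--
--     for claim in claims:
--         w = claim["width"]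
--         if w > 0:
--             h = claim["height"]
--             if h > 0:
--                 x, y = claim["x"], claim["y"]
--                 for i in range(w):
--                     for j in range(h):
--                         cell = (i + x, y + j)
--                         claimed.add(cell)
--                         if any(ex <= cell[0] < ex + ew and ey <= cell[1] < ey + eh
--                                for ex, ey, ew, eh in earlier):
--                             overlapping.add(cell)
--                 earlier.append((x, y, w, h))
--
--     return claimed, overlapping
-- ===== Notes on version B (the rewrite author's own statement) =====
-- stated objective: alternative
-- what changed: Replaces A's per-claim set construction and intersection against the accumulated claimed set with a single-pass geometric test: a cell is overlapping iff some earlier claim's rectangle contains it by an arithmetic bounds check against a list of earlier rectangles (empty rectangles skipped), so no cell-set intersection is ever formed.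
import Mathlib
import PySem

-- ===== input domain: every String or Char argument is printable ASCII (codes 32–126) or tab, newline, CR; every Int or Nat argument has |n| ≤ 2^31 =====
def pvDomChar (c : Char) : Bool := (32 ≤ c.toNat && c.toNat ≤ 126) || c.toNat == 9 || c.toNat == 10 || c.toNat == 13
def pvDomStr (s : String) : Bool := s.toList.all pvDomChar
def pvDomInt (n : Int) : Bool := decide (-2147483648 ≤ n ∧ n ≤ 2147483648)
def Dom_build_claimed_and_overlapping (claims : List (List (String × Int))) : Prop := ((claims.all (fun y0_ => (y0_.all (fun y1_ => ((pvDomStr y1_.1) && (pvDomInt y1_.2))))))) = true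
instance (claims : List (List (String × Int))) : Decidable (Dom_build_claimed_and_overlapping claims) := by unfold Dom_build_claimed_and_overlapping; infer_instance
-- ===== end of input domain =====

-- B detects overlap geometrically in one pass (a cell is overlapping iff an earlier claim's rectangle
-- contains it, an arithmetic bounds test against the list of earlier non-empty rectangles) instead of
-- intersecting each claim's cell set with the accumulated claimed set; objective: alternative, not faster.

-- ===== PORT A =====
-- claim["k"]: first match in the association list (arbitrary 0 when the key is absent; Pre_ excludes
-- absent keys, where the Python raises KeyError)
def pvLookup (claim : List (String × Int)) (k : String) : Int :=
  (((claim.find? (fun p => p.1 == k)).map (fun p => p.2)).getD 0)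

-- the generator's cells in generation order: for i in range(width): for j in range(height): (i+x, y+j)
def pvCells (claim : List (String × Int)) : List (Int × Int) :=
  (PySem.List.pyRange 0 (pvLookup claim "width")).flatMap (fun i =>
    (PySem.List.pyRange 0 (pvLookup claim "height")).map (fun j =>
      (i + pvLookup claim "x", pvLookup claim "y" + j)))

-- one iteration of A's loop: current = set(generator); overlapping |= current & claimed; claimed |= current
def pvStepA (st : PySem.Set (Int × Int) × PySem.Set (Int × Int)) (claim : List (String × Int)) :
    PySem.Set (Int × Int) × PySem.Set (Int × Int) :=
  let current : PySem.Set (Int × Int) := PySem.Set.ofList (pvCells claim)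
  (PySem.Set.union st.1 current, PySem.Set.union st.2 (PySem.Set.inter current st.1))

def build_claimed_and_overlapping (claims : List (List (String × Int))) : (List (Int × Int)) × (List (Int × Int)) :=
  claims.foldl pvStepA ((PySem.Set.empty : PySem.Set (Int × Int)), (PySem.Set.empty : PySem.Set (Int × Int)))

-- ===== PORT B =====
-- the arithmetic containment test: ex <= a < ex + ew and ey <= b < ey + eh
def pvContains (r : Int × Int × Int × Int) (cell : Int × Int) : Bool :=
  decide (r.1 ≤ cell.1 ∧ cell.1 < r.1 + r.2.2.1 ∧ r.2.1 ≤ cell.2 ∧ cell.2 < r.2.1 + r.2.2.2)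

-- the body of B's innermost loop: claimed.add(cell); if any(earlier contains cell): overlapping.add(cell)
def pvCellStep (earlier : List (Int × Int × Int × Int))
    (st : PySem.Set (Int × Int) × PySem.Set (Int × Int)) (cell : Int × Int) :
    PySem.Set (Int × Int) × PySem.Set (Int × Int) :=
  (PySem.Set.add st.1 cell,
   if earlier.any (fun e => pvContains e cell) then PySem.Set.add st.2 cell else st.2)

-- one iteration of B's loop: skip empty rectangles, else walk the cells and append the rectangle
def pvStepB (st : (PySem.Set (Int × Int) × PySem.Set (Int × Int)) × List (Int × Int × Int × Int))
    (claim : List (String × Int)) :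
    (PySem.Set (Int × Int) × PySem.Set (Int × Int)) × List (Int × Int × Int × Int) :=
  let w := pvLookup claim "width"
  if 0 < w then
    let h := pvLookup claim "height"
    if 0 < h then
      let x := pvLookup claim "x"
      let y := pvLookup claim "y"
      let cells := (PySem.List.pyRange 0 w).flatMap (fun i =>
        (PySem.List.pyRange 0 h).map (fun j => (i + x, y + j)))
      (cells.foldl (pvCellStep st.2) st.1, st.2 ++ [(x, y, w, h)])
    else st
  else st

def build_claimed_and_overlapping_alt (claims : List (List (String × Int))) : (List (Int × Int)) × (List (Int × Int)) :=
  (claims.foldl pvStepB (((PySem.Set.empty : PySem.Set (Int × Int)), (PySem.Set.empty : PySem.Set (Int × Int))), [])).1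

-- ===== PRECONDITION & SPEC =====
-- key lookup used only by Pre_ (first match in the association list, as Python's dict lookup)
def pvGetKey (claim : List (String × Int)) (k : String) : Option Int :=
  (claim.find? (fun p => p.1 == k)).map (fun p => p.2)

-- Pre_ excludes exactly the inputs on which the Python A raises KeyError: a claim missing "width", or
-- missing "height" when its width is positive, or missing "x"/"y" when width and height are both positive.
def Pre_build_claimed_and_overlapping (claims : List (List (String × Int))) : Prop :=
  ∀ claim ∈ claims, (pvGetKey claim "width").isSome ∧
    (0 < (pvGetKey claim "width").getD 0 → (pvGetKey claim "height").isSome ∧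
      (0 < (pvGetKey claim "height").getD 0 →
        (pvGetKey claim "x").isSome ∧ (pvGetKey claim "y").isSome))
instance (claims : List (List (String × Int))) : Decidable (Pre_build_claimed_and_overlapping claims) := by unfold Pre_build_claimed_and_overlapping; infer_instance

def pvWitness_build_claimed_and_overlapping : (List (List (String × Int))) :=
  [[("width", 0)], [("width", 2), ("height", 1), ("x", 0), ("y", 5)]]

def Spec_build_claimed_and_overlapping (claims : List (List (String × Int))) (out : (List (Int × Int)) × (List (Int × Int))) : Prop := out = build_claimed_and_overlapping_alt claims
instance (claims : List (List (String × Int))) (out : (List (Int × Int)) × (List (Int × Int))) : Decidable (Spec_build_claimed_and_overlapping claims out) := by unfold Spec_build_claimed_and_overlapping; infer_instance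

-- ===== CLAIM =====
def Claim_equal_build_claimed_and_overlapping : Prop := ∀ (claims : List (List (String × Int))), Dom_build_claimed_and_overlapping claims → Pre_build_claimed_and_overlapping claims → Spec_build_claimed_and_overlapping claims (build_claimed_and_overlapping claims)

-- ===== LEMMAS AND PROOFS =====

-- cell membership in a rectangle's cell list IS the arithmetic containment test
lemma pv_mem_rectCells (x y w h : Int) (cell : Int × Int) :
    cell ∈ (PySem.List.pyRange 0 w).flatMap (fun i =>
        (PySem.List.pyRange 0 h).map (fun j => (i + x, y + j))) ↔
      pvContains (x, y, w, h) cell = true := by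
  obtain ⟨a, b⟩ := cell
  simp only [pvContains, List.mem_flatMap, List.mem_map,
    PySem.List.mem_pyRange_one, decide_eq_true_eq]
  constructor
  · rintro ⟨i, ⟨hi1, hi2⟩, j, ⟨hj1, hj2⟩, heq⟩
    cases heq
    omega
  · rintro ⟨h1, h2, h3, h4⟩
    exact ⟨a - x, by omega, b - y, by omega, by simp only [Prod.mk.injEq]; omega⟩

-- the cells of one claim are pairwise distinct
lemma pvCells_nodup (claim : List (String × Int)) : (pvCells claim).Nodup := by
  unfold pvCells
  rw [List.nodup_flatMap]
  refine ⟨fun i _ => ?_, ?_⟩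
  · refine (PySem.List.nodup_pyRange_one 0 _).map ?_
    intro a b hab
    simpa using hab
  · refine (PySem.List.nodup_pyRange_one 0 _).imp ?_
    intro a b hab
    simp only [Function.onFun, List.Disjoint, List.mem_map]
    rintro p ⟨j1, _, rfl⟩ ⟨j2, _, hp⟩
    have : a = b := by
      have := congrArg Prod.fst hp
      simpa using this.symm
    exact hab this

-- A's cell list is empty when the width or the height is non-positive
lemma pvCells_eq_nil (claim : List (String × Int))
    (h : pvLookup claim "width" ≤ 0 ∨ pvLookup claim "height" ≤ 0) :
    pvCells claim = [] := by
  unfold pvCells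
  rcases h with h | h
  · rw [PySem.List.pyRange_one_eq_nil h, List.flatMap_nil]
  · rw [PySem.List.pyRange_one_eq_nil h]
    simp

-- A's step is the identity on a claim with an empty cell list
lemma pvStepA_nil (claim : List (String × Int)) (st : PySem.Set (Int × Int) × PySem.Set (Int × Int))
    (h : pvCells claim = []) : pvStepA st claim = st := by
  simp [pvStepA, h, PySem.Set.union, PySem.Set.update, PySem.Set.inter]

-- a fold of a componentwise step is the pair of the component folds
lemma pv_foldl_pair {α β γ : Type} (f : α → γ → α) (g : β → γ → β) (xs : List γ) (a : α) (b : β) :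
    xs.foldl (fun st c => (f st.1 c, g st.2 c)) (a, b) = (xs.foldl f a, xs.foldl g b) := by
  induction xs generalizing a b with
  | nil => rfl
  | cons c rest ih => simp only [List.foldl_cons]; exact ih (f a c) (g b c)

-- the invariant linking A's claimed set to B's list of earlier rectangles
def pvInv (C : PySem.Set (Int × Int)) (earlier : List (Int × Int × Int × Int)) : Prop :=
  C.Nodup ∧ ∀ cell, PySem.Set.contains C cell = earlier.any (fun e => pvContains e cell)

-- one non-empty claim: A's set-algebra step equals B's geometric step and preserves the invariant
lemma pvClaimStep (claim : List (String × Int)) (C O : PySem.Set (Int × Int))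
    (earlier : List (Int × Int × Int × Int)) (hinv : pvInv C earlier) :
    pvStepA (C, O) claim =
      (pvCells claim).foldl (pvCellStep earlier) (C, O)
      ∧ pvInv (pvStepA (C, O) claim).1
          (earlier ++ [(pvLookup claim "x", pvLookup claim "y",
                        pvLookup claim "width", pvLookup claim "height")]) ∧
      (pvCells claim).foldl (pvCellStep earlier) (C, O) =
        ((pvCells claim).foldl PySem.Set.add C,
         (pvCells claim).foldl
           (fun s cell => if earlier.any (fun e => pvContains e cell) then PySem.Set.add s cell else s) O) := by
  obtain ⟨hnd, hmem⟩ := hinv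
  have hcn := pvCells_nodup claim
  have hof : PySem.Set.ofList (pvCells claim) = pvCells claim :=
    PySem.Set.ofList_eq_self_of_nodup _ hcn
  have hsplit := pv_foldl_pair (PySem.Set.add)
    (fun s cell => if earlier.any (fun e => pvContains e cell) then PySem.Set.add s cell else s)
    (pvCells claim) C O
  have hmemcells : ∀ cell, cell ∈ pvCells claim ↔
      pvContains (pvLookup claim "x", pvLookup claim "y",
        pvLookup claim "width", pvLookup claim "height") cell = true := by
    intro cell
    exact pv_mem_rectCells _ _ _ _ cell
  refine ⟨?_, ⟨?_, ?_⟩, hsplit⟩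
  · -- the two steps produce the same pair
    have : (pvCells claim).foldl (pvCellStep earlier) (C, O) =
        ((pvCells claim).foldl PySem.Set.add C,
         (pvCells claim).foldl
           (fun s cell => if earlier.any (fun e => pvContains e cell) then PySem.Set.add s cell else s) O) := hsplit
    rw [this]
    simp only [pvStepA, hof, Prod.mk.injEq]
    constructor
    · rw [PySem.Set.union, PySem.Set.update]
    · rw [← List.foldl_filter, PySem.Set.union, PySem.Set.update]
      congr 1
      simp only [PySem.Set.inter]
      exact List.filter_congr (fun cell _ => hmem cell)
  · -- Nodup is preserved
    show ((PySem.Set.union C (PySem.Set.ofList (pvCells claim)))).Nodup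
    exact PySem.Set.nodup_union _ _ hnd
  · -- the membership characterisation is preserved
    intro cell
    show PySem.Set.contains (PySem.Set.union C (PySem.Set.ofList (pvCells claim))) cell = _
    rw [Bool.eq_iff_iff, PySem.Set.contains_iff, PySem.Set.mem_union, PySem.Set.mem_ofList]
    rw [List.any_append, Bool.or_eq_true, List.any_cons, List.any_nil, Bool.or_false]
    rw [← PySem.Set.contains_iff, hmem cell, hmemcells cell]

-- the whole loop: A's fold equals the first component of B's fold, by the invariant
lemma pvMain (claims : List (List (String × Int))) (C O : PySem.Set (Int × Int))
    (earlier : List (Int × Int × Int × Int)) (h : pvInv C earlier) :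
    claims.foldl pvStepA (C, O) = (claims.foldl pvStepB ((C, O), earlier)).1 := by
  induction claims generalizing C O earlier with
  | nil => rfl
  | cons claim rest ih =>
    simp only [List.foldl_cons]
    by_cases hw : 0 < pvLookup claim "width"
    · by_cases hh : 0 < pvLookup claim "height"
      · obtain ⟨h1, h2, h3⟩ := pvClaimStep claim C O earlier h
        have hstepB : pvStepB ((C, O), earlier) claim =
            ((pvCells claim).foldl (pvCellStep earlier) (C, O),
             earlier ++ [(pvLookup claim "x", pvLookup claim "y",
                          pvLookup claim "width", pvLookup claim "height")]) := by
          simp only [pvStepB, pvCells, if_pos hw, if_pos hh]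
        rw [hstepB, ← h1]
        have := ih (pvStepA (C, O) claim).1 (pvStepA (C, O) claim).2 _ h2
        simpa using this
      · push Not at hh
        have hB : pvStepB ((C, O), earlier) claim = ((C, O), earlier) := by
          simp only [pvStepB, if_pos hw, if_neg (by omega : ¬ 0 < pvLookup claim "height")]
        rw [hB, pvStepA_nil claim (C, O) (pvCells_eq_nil claim (Or.inr hh))]
        exact ih C O earlier h
    · push Not at hw
      have hB : pvStepB ((C, O), earlier) claim = ((C, O), earlier) := by
        simp only [pvStepB, if_neg (by omega : ¬ 0 < pvLookup claim "width")]
      rw [hB, pvStepA_nil claim (C, O) (pvCells_eq_nil claim (Or.inl hw))]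
      exact ih C O earlier h

-- ===== VERDICT (by name: the statement is the Claim_ definition above) =====
theorem build_claimed_and_overlapping_spec : Claim_equal_build_claimed_and_overlapping := by
  intro claims _ _
  unfold Spec_build_claimed_and_overlapping build_claimed_and_overlapping build_claimed_and_overlapping_alt
  have hinv : pvInv (PySem.Set.empty : PySem.Set (Int × Int)) [] := by
    refine ⟨List.nodup_nil, fun cell => ?_⟩
    simp [PySem.Set.empty, PySem.Set.contains]
  exact pvMain claims PySem.Set.empty PySem.Set.empty [] hinv
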